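-- pv_equiv track=rewrite | github.com/gumaonelove/ege_2021 | Сборник 100 задач Джобс Средний/17_1.py | f
-- ===== SOURCE A (Python) =====
-- def f(n):
--     last = n%10; n//=10
--     last_chet = (last%2==0)
--     while n!=0:
--         now = n%10; n//=10
--         now_chet = (now%2==0)
--         if now_chet == last_chet: return False
--         last_chet = now_chet
--     return True
-- ===== SOURCE B (Python) =====
-- def f(n):
--     # collect-then-verify: gather digit parity bits, then check adjacent pairs differ
--     if n < 0:
--         # floor-division digit stream of a negative number ends in repeated 9s,
--         # so its parities can never alternate
--         return False
--     parities = []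
--     while n > 0:
--         parities.append(n % 2)  # parity of the last digit (10 is even)
--         n //= 10
--     return all(a != b for a, b in zip(parities, parities[1:]))
-- ===== Notes on version B (the rewrite author's own statement) =====
-- stated objective: alternative
-- what changed: A fuses digit extraction with an on-the-fly short-circuit parity comparison; B first collects the digit parity bits into a list (handling negatives by the mathematical fact that their floor-division digit stream ends in repeated 9s) and then separately checks that every adjacent pair of parities differs via zip.
import Mathlib
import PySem

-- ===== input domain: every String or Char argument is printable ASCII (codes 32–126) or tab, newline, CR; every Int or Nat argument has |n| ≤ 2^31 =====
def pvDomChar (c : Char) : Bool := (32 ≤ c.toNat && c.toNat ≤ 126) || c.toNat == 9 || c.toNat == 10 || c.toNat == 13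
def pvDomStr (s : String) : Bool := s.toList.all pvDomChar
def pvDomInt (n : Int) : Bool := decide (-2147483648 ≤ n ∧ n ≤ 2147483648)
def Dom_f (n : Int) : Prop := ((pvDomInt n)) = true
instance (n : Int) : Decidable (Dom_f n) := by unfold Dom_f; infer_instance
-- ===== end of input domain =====

-- B collects the digit parity bits into a list and then checks adjacent pairs differ,
-- instead of A's fused short-circuit scan; equal on every Int.

-- |n // 10| < |n| whenever n is neither 0 nor -1 (termination of both ports' loops)
theorem pv_floordiv10_natAbs_lt (n : Int) (h0 : n ≠ 0) (h1 : n ≠ -1) :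
    (PySem.Int.floordiv n 10).natAbs < n.natAbs := by
  have hq := PySem.Int.floordiv_mul_add_mod n 10
  have hr1 := PySem.Int.mod_nonneg n (b := 10) (by norm_num)
  have hr2 := PySem.Int.mod_lt n (b := 10) (by norm_num)
  omega

-- ===== PORT A =====
-- A's while loop: state = (remaining n, parity flag of the previous digit)
def fLoop (n : Int) (last_chet : Bool) : Bool :=
  if hn : n = 0 then true
  else
    let now := PySem.Int.mod n 10
    let n' := PySem.Int.floordiv n 10
    let now_chet := decide (PySem.Int.mod now 2 = 0)
    if now_chet = last_chet then false
    else fLoop n' now_chet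
  termination_by 2 * n.natAbs + (if last_chet then 1 else 0)
  decreasing_by
    rename_i hne
    by_cases h1 : n = -1
    · subst h1
      have hc : (decide (PySem.Int.mod (PySem.Int.mod (-1:Int) 10) 2 = 0)) = false := by decide
      have hne' : ¬(decide (PySem.Int.mod (PySem.Int.mod (-1:Int) 10) 2 = 0)) = last_chet := hne
      rw [hc] at hne'
      have hl : last_chet = true := by cases last_chet <;> simp_all
      subst hl
      decide
    · have hlt := pv_floordiv10_natAbs_lt n hn h1
      have hb1 : (if (decide (PySem.Int.mod (PySem.Int.mod n 10) 2 = 0)) = true then 1 else 0) ≤ 1 := by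
        split <;> omega
      have hb2 : (0:Nat) ≤ (if last_chet = true then 1 else 0) := by omega
      omega

def f (n : Int) : Bool :=
  let last := PySem.Int.mod n 10
  let n1 := PySem.Int.floordiv n 10
  let last_chet := decide (PySem.Int.mod last 2 = 0)
  fLoop n1 last_chet

-- ===== PORT B =====
-- B's while loop (only reached with 0 ≤ n): collect n % 2, the parity of the last digit
def collectParities (n : Int) : List Int :=
  if _h : 0 < n then
    PySem.Int.mod n 2 :: collectParities (PySem.Int.floordiv n 10)
  else []
  termination_by n.natAbs
  decreasing_by exact pv_floordiv10_natAbs_lt n (by omega) (by omega)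

def f_alt (n : Int) : Bool :=
  if n < 0 then false
  else
    let parities := collectParities n
    (parities.zip parities.tail).all (fun p => p.1 != p.2)

-- ===== PRECONDITION & SPEC =====
def Spec_f (n : Int) (out : Bool) : Prop := out = f_alt n
instance (n : Int) (out : Bool) : Decidable (Spec_f n out) := by unfold Spec_f; infer_instance

-- ===== CLAIM (what is proved, stated in full; the proofs are below) =====
def Claim_equal_f : Prop := ∀ (n : Int), Dom_f n → Spec_f n (f n)

-- ===== LEMMAS AND PROOFS =====

theorem pv_floordiv10_neg (n : Int) (h : n < 0) : PySem.Int.floordiv n 10 < 0 := by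
  have hq := PySem.Int.floordiv_mul_add_mod n 10
  have hr1 := PySem.Int.mod_nonneg n (b := 10) (by norm_num)
  have hr2 := PySem.Int.mod_lt n (b := 10) (by norm_num)
  omega

theorem pv_floordiv10_nonneg (n : Int) (h : 0 ≤ n) : 0 ≤ PySem.Int.floordiv n 10 := by
  have hq := PySem.Int.floordiv_mul_add_mod n 10
  have hr1 := PySem.Int.mod_nonneg n (b := 10) (by norm_num)
  have hr2 := PySem.Int.mod_lt n (b := 10) (by norm_num)
  nlinarith

-- the parity of the last digit is the parity of the number (10 is even)
theorem pv_mod10_mod2 (n : Int) :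
    PySem.Int.mod (PySem.Int.mod n 10) 2 = PySem.Int.mod n 2 := by
  have h10 := PySem.Int.mod_eq_emod_of_pos (a := n) (b := 10) (by norm_num)
  have h2a := PySem.Int.mod_eq_emod_of_pos (a := PySem.Int.mod n 10) (b := 2) (by norm_num)
  have h2b := PySem.Int.mod_eq_emod_of_pos (a := n) (b := 2) (by norm_num)
  rw [h2a, h2b, h10]
  omega

theorem pv_mod2_cases (n : Int) : PySem.Int.mod n 2 = 0 ∨ PySem.Int.mod n 2 = 1 := by
  have h1 := PySem.Int.mod_nonneg n (b := 2) (by norm_num)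
  have h2 := PySem.Int.mod_lt n (b := 2) (by norm_num)
  omega

-- on negative n, A's loop always returns false (the digit stream ends in repeated 9s)
theorem pv_loop_neg (k : Nat) : ∀ (n : Int) (b : Bool),
    n < 0 → 2 * n.natAbs + (if b then 1 else 0) ≤ k → fLoop n b = false := by
  induction k with
  | zero => intro n b hn hk; omega
  | succ k ih =>
    intro n b hn hk
    rw [fLoop]
    rw [dif_neg (by omega : ¬ n = 0)]
    by_cases hc : (decide (PySem.Int.mod (PySem.Int.mod n 10) 2 = 0)) = b
    · rw [if_pos hc]
    · rw [if_neg hc]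
      by_cases h1 : n = -1
      · subst h1
        have hc9 : (decide (PySem.Int.mod (PySem.Int.mod (-1 : Int) 10) 2 = 0)) = false := by decide
        rw [hc9] at hc ⊢
        have hb : b = true := by cases b <;> simp_all
        subst hb
        apply ih _ _ (by decide)
        have h2 : ((PySem.Int.floordiv (-1 : Int) 10).natAbs) = 1 := by decide
        rw [h2]
        have hm1 : ((-1 : Int).natAbs) = 1 := by decide
        rw [hm1] at hk
        simp only [Bool.false_eq_true, if_false, if_true] at hk ⊢
        omega
      · apply ih _ _ (pv_floordiv10_neg n hn)
        have hlt := pv_floordiv10_natAbs_lt n (by omega) h1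
        have hb1 : (if (decide (PySem.Int.mod (PySem.Int.mod n 10) 2 = 0)) = true then 1 else 0) ≤ 1 := by
          split <;> omega
        have hb2 : (0:Nat) ≤ (if b = true then 1 else 0) := by omega
        omega

-- on nonnegative m, A's loop seeded with previous parity p equals B's adjacent-pair check
theorem pv_loop_pos (k : Nat) : ∀ (m p : Int),
    0 ≤ m → m.natAbs ≤ k → (p = 0 ∨ p = 1) →
    fLoop m (decide (p = 0)) =
      ((p :: collectParities m).zip (collectParities m)).all (fun q => q.1 != q.2) := by
  induction k with
  | zero =>
    intro m p hm hk _
    have hm0 : m = 0 := by omega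
    subst hm0
    rw [fLoop, collectParities]
    simp
  | succ k ih =>
    intro m p hm hk hp
    by_cases hm0 : m = 0
    · subst hm0; rw [fLoop, collectParities]; simp
    · have hmpos : 0 < m := by omega
      rw [fLoop, collectParities]
      rw [dif_neg hm0, dif_pos hmpos]
      show (if (decide (PySem.Int.mod (PySem.Int.mod m 10) 2 = 0)) = decide (p = 0) then false
            else fLoop (PySem.Int.floordiv m 10) (decide (PySem.Int.mod (PySem.Int.mod m 10) 2 = 0))) = _
      rw [pv_mod10_mod2]
      have hmod2 := pv_mod2_cases m
      have hdivnn := pv_floordiv10_nonneg m hm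
      have hlt := pv_floordiv10_natAbs_lt m hm0 (by omega)
      have ihr := ih (PySem.Int.floordiv m 10) (PySem.Int.mod m 2) hdivnn (by omega) hmod2
      by_cases heq : PySem.Int.mod m 2 = p
      · -- same parity: A returns false, B's head pair check fails
        have hcc : (decide (PySem.Int.mod m 2 = 0)) = (decide (p = 0)) := by rw [heq]
        rw [if_pos hcc]
        have hpp : (p != PySem.Int.mod m 2) = false := by rw [heq]; simp
        rw [List.zip_cons_cons, List.all_cons, hpp, Bool.false_and]
      · have hne : ¬ ((decide (PySem.Int.mod m 2 = 0)) = (decide (p = 0))) := by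
          rcases hp with h | h <;> rcases hmod2 with h2 | h2
          · exact absurd (h2.trans h.symm) heq
          · rw [h, h2]; decide
          · rw [h, h2]; decide
          · exact absurd (h2.trans h.symm) heq
        rw [if_neg hne, ihr]
        have hpne : (p != PySem.Int.mod m 2) = true := by
          rcases hp with h | h <;> rcases hmod2 with h2 | h2
          · exact absurd (h2.trans h.symm) heq
          · rw [h, h2]; decide
          · rw [h, h2]; decide
          · exact absurd (h2.trans h.symm) heq
        rw [List.zip_cons_cons, List.all_cons, hpne, Bool.true_and]

-- ===== VERDICT (by name: the statement is the Claim_ definition above) =====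
theorem f_spec : Claim_equal_f := by
  intro n _
  show fLoop (PySem.Int.floordiv n 10) (decide (PySem.Int.mod (PySem.Int.mod n 10) 2 = 0)) = f_alt n
  rw [pv_mod10_mod2]
  unfold f_alt
  by_cases hneg : n < 0
  · rw [if_pos hneg]
    apply pv_loop_neg (2 * (PySem.Int.floordiv n 10).natAbs + 1) _ _ (pv_floordiv10_neg n hneg)
    have : (if (decide (PySem.Int.mod n 2 = 0)) = true then 1 else 0) ≤ 1 := by split <;> omega
    omega
  · rw [if_neg hneg]
    by_cases h0 : n = 0
    · subst h0; rw [fLoop, collectParities]; simp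
    · have hpos : 0 < n := by omega
      have h := pv_loop_pos (PySem.Int.floordiv n 10).natAbs (PySem.Int.floordiv n 10)
        (PySem.Int.mod n 2) (pv_floordiv10_nonneg n (by omega)) (le_refl _) (pv_mod2_cases n)
      rw [h]
      show _ = ((collectParities n).zip (collectParities n).tail).all (fun q => q.1 != q.2)
      conv_rhs => rw [collectParities, dif_pos hpos]
      rfl
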